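-- pv_equiv track=rewrite | github.com/Levyaton/KAB-Semestralka | ear/VignettCipher.py | getAlphabetMatrix
-- ===== SOURCE A (Python) =====
-- def getAlphabetMatrix(alphabet):
--     matrix = {}
--     length = len(alphabet)
--     prev = alphabet[length-1] + alphabet[0:length-1]
--
--     for x in range(0,len(alphabet),1):
--         char = alphabet[x]
--         current =  prev[1:] + prev[0]
--         matrix[char] = current
--         prev = current
--     return matrix
-- ===== SOURCE B (Python) =====
-- def getAlphabetMatrix(alphabet):
--     return {c: alphabet[x:] + alphabet[:x] for x, c in enumerate(alphabet)}
-- ===== Notes on version B (the rewrite author's own statement) =====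
-- stated objective: simpler
-- what changed: Each rotation is computed directly from its index as alphabet[x:]+alphabet[:x] in a dict comprehension, eliminating A's threaded previous-rotation accumulator and pre-loop seed rotation.
-- crash fix: On the empty string A raises IndexError (it evaluates alphabet[length-1] before the loop) while B returns the empty dict {}. — e.g. on getAlphabetMatrix(""): A raises IndexError, B returns []
import Mathlib
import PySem

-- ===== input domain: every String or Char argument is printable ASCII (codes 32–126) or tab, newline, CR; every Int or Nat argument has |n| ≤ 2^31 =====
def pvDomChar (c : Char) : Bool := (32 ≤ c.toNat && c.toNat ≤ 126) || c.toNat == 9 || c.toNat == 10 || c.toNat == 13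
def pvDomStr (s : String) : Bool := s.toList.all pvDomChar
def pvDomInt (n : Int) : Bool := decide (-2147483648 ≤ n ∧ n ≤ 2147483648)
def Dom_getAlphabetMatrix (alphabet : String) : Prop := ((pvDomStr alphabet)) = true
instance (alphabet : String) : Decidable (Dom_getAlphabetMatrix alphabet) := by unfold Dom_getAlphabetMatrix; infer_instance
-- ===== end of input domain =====

-- B computes each rotation directly from its index (alphabet[x:]+alphabet[:x]) in a dict
-- comprehension, instead of threading A's running previous-rotation accumulator: simpler decomposition,
-- same cost. (On the empty string A raises IndexError; B returns {} — see Raises_ below.)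

-- ===== PORT A =====
-- A's loop body: char = alphabet[x]; current = prev[1:] + prev[0]; matrix[char] = current; prev = current
-- (the `none` branches are where Python would raise an IndexError; unreachable under Pre_)
def pvStepA (l : List Char) (st : PySem.Dict String String × List Char) (x : Int) :
    PySem.Dict String String × List Char :=
  match PySem.List.pyGet? l x with
  | some ch =>
    match PySem.List.pyGet? st.2 0 with
    | some c0 =>
      let current := PySem.List.slice st.2 (some 1) none ++ [c0]
      (st.1.insert (String.mk [ch]) (String.mk current), current)
    | none => st
  | none => st

def getAlphabetMatrix (alphabet : String) : List (String × String) :=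
  let l := alphabet.toList
  let length : Int := l.length
  -- prev = alphabet[length-1] + alphabet[0:length-1]  (raises IndexError when alphabet = "")
  let prev : List Char :=
    (match PySem.List.pyGet? l (length - 1) with
     | some c => [c]
     | none => []) ++ PySem.List.slice l (some 0) (some (length - 1))
  ((PySem.List.pyRange 0 length 1).foldl (pvStepA l) (PySem.Dict.empty, prev)).1.items

-- ===== PORT B =====
-- {c: alphabet[x:] + alphabet[:x] for x, c in enumerate(alphabet)}
def getAlphabetMatrix_alt (alphabet : String) : List (String × String) :=
  let l := alphabet.toList
  (PySem.Dict.ofList ((PySem.List.enumerate l).map (fun p =>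
    (String.mk [p.2],
     String.mk (PySem.List.slice l (some p.1) none ++ PySem.List.slice l none (some p.1)))))).items

-- ===== PRECONDITION & SPEC =====
-- Pre_ excludes only the empty string, on which A raises IndexError (alphabet[length-1]).
def Pre_getAlphabetMatrix (alphabet : String) : Prop := alphabet ≠ ""
instance (alphabet : String) : Decidable (Pre_getAlphabetMatrix alphabet) := by
  unfold Pre_getAlphabetMatrix; infer_instance
def pvWitness_getAlphabetMatrix : String := "abc"

-- On the empty string A raises IndexError (it evaluates alphabet[length-1] before the loop) while B returns the empty dict {}.
def Raises_getAlphabetMatrix (alphabet : String) : Prop := alphabet = ""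
instance (alphabet : String) : Decidable (Raises_getAlphabetMatrix alphabet) := by
  unfold Raises_getAlphabetMatrix; infer_instance
def pvRaiseWitness_getAlphabetMatrix : String := ""
def pvRaiseWitnessOut_getAlphabetMatrix : List (String × String) := []

def Spec_getAlphabetMatrix (alphabet : String) (out : List (String × String)) : Prop :=
  out = getAlphabetMatrix_alt alphabet
instance (alphabet : String) (out : List (String × String)) : Decidable (Spec_getAlphabetMatrix alphabet out) := by
  unfold Spec_getAlphabetMatrix; infer_instance

-- ===== CLAIM (what is proved, stated in full; the proofs are below) =====
def Claim_equal_getAlphabetMatrix : Prop := ∀ (alphabet : String),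
  Dom_getAlphabetMatrix alphabet → Pre_getAlphabetMatrix alphabet →
  Spec_getAlphabetMatrix alphabet (getAlphabetMatrix alphabet)

def Claim_raises_getAlphabetMatrix : Prop :=
  (∀ (alphabet : String), Dom_getAlphabetMatrix alphabet → Raises_getAlphabetMatrix alphabet →
    ¬ Pre_getAlphabetMatrix alphabet) ∧
  (Dom_getAlphabetMatrix (pvRaiseWitness_getAlphabetMatrix) ∧
   Raises_getAlphabetMatrix (pvRaiseWitness_getAlphabetMatrix) ∧
   getAlphabetMatrix_alt (pvRaiseWitness_getAlphabetMatrix) = pvRaiseWitnessOut_getAlphabetMatrix)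

-- ===== LEMMAS AND PROOFS =====

-- the left rotation of l by k places
def pvRot (l : List Char) (k : Nat) : List Char := l.drop k ++ l.take k

lemma drop_take_one (l : List Char) (k : Nat) (hk : k < l.length) :
    (l.drop k).take 1 = [l[k]] := by
  rw [List.drop_eq_getElem_cons hk]; rfl

lemma drop_pred (l : List Char) (hl : 0 < l.length) :
    l.drop (l.length - 1) = [l[l.length - 1]] := by
  have h : l.length - 1 + 1 = l.length := by omega
  rw [List.drop_eq_getElem_cons (by omega), h, List.drop_length]

lemma pvRot_cons (l : List Char) (j : Nat) (hj : j < l.length) :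
    pvRot l j = l[j] :: (l.drop (j + 1) ++ l.take j) := by
  rw [pvRot, List.drop_eq_getElem_cons hj]; rfl

-- one step of A's loop, starting from prev = pvRot l j, produces pvRot l ((j+1) % n)
lemma stepA_eq (l : List Char) (d : PySem.Dict String String) (j k : Nat)
    (hj : j < l.length) (hk : k < l.length) :
    pvStepA l (d, pvRot l j) ((k : Nat) : Int) =
      (d.insert (String.mk ((l.drop k).take 1)) (String.mk (pvRot l ((j + 1) % l.length))),
       pvRot l ((j + 1) % l.length)) := by
  have hget : PySem.List.pyGet? l ((k : Nat) : Int) = some l[k] := by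
    rw [PySem.List.pyGet?_natCast, List.getElem?_eq_getElem hk]
  have hcons := pvRot_cons l j hj
  have hcur : PySem.List.slice (pvRot l j) (some 1) none ++ [l[j]] = pvRot l ((j + 1) % l.length) := by
    rw [PySem.List.slice_from_one, hcons]
    show l.drop (j + 1) ++ l.take j ++ [l[j]] = _
    have htake : l.take (j + 1) = l.take j ++ [l[j]] := by
      rw [List.take_succ, List.getElem?_eq_getElem hj]; rfl
    by_cases h1 : j + 1 = l.length
    · have : (j + 1) % l.length = 0 := by rw [h1]; simp
      rw [this, pvRot]
      simp [← htake, h1]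
    · have : (j + 1) % l.length = j + 1 := Nat.mod_eq_of_lt (by omega)
      rw [this, pvRot, htake, List.append_assoc]
  have hget0 : PySem.List.pyGet? (pvRot l j) 0 = some l[j] := by
    rw [hcons]
    rw [show (0 : Int) = ((0 : Nat) : Int) from rfl, PySem.List.pyGet?_natCast]
    simp
  rw [pvStepA, hget, hget0]
  simp only [hcur, drop_take_one l k hk]

-- the fold of A's loop over indices [k, k+m) with prev = pvRot l j, (j+1) % n ≡ k (mod n)
lemma loopA (l : List Char) :
    ∀ (m k j : Nat) (d : PySem.Dict String String), k + m = l.length → j < l.length →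
      (j + 1) % l.length = k % l.length →
      (((List.range' k m).map (fun i : Nat => (i : Int))).foldl (pvStepA l) (d, pvRot l j)).1 =
      (List.range' k m).foldl
        (fun d x => d.insert (String.mk ((l.drop x).take 1)) (String.mk (pvRot l x))) d := by
  intro m
  induction m with
  | zero => intro k j d _ _ _; rfl
  | succ m ih =>
    intro k j d hkm hj hjk
    have hk : k < l.length := by omega
    have hkmod : (j + 1) % l.length = k := by rw [hjk, Nat.mod_eq_of_lt hk]
    rw [List.range'_succ, List.map_cons, List.foldl_cons, List.foldl_cons,
        stepA_eq l d j k hj hk, hkmod]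
    exact ih (k + 1) k _ (by omega) hk rfl

-- enumerate characterised by index
lemma enumerate_eq (l : List Char) : ∀ (s : Int),
    PySem.List.enumerate l s = (List.range l.length).map (fun (k : Nat) => (s + (k : Int), l.getD k 'a')) := by
  induction l with
  | nil => intro s; rfl
  | cons x t ih =>
    intro s
    show (s, x) :: PySem.List.enumerate t (s + 1) = _
    rw [ih (s + 1), List.length_cons, List.range_succ_eq_map, List.map_cons, List.map_map]
    simp only [Nat.cast_zero, add_zero, List.getD_cons_zero, List.cons.injEq, true_and]
    apply List.map_congr_left
    intro k _
    simp only [Function.comp_apply, List.getD_cons_succ]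
    congr 1
    push_cast
    ring

-- ===== VERDICT (by name: the statement is the Claim_ definition above) =====
theorem getAlphabetMatrix_spec : Claim_equal_getAlphabetMatrix := by
  unfold Claim_equal_getAlphabetMatrix
  intro alphabet _ hpre
  unfold Spec_getAlphabetMatrix getAlphabetMatrix getAlphabetMatrix_alt
  generalize hl : alphabet.toList = l
  show ((PySem.List.pyRange 0 (l.length : Int) 1).foldl (pvStepA l)
      (PySem.Dict.empty,
       (match PySem.List.pyGet? l ((l.length : Int) - 1) with
        | some c => [c]
        | none => []) ++ PySem.List.slice l (some 0) (some ((l.length : Int) - 1)))).1.items =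
    (PySem.Dict.ofList ((PySem.List.enumerate l).map (fun p =>
      (String.mk [p.2],
       String.mk (PySem.List.slice l (some p.1) none ++ PySem.List.slice l none (some p.1)))))).items
  have hne : l ≠ [] := by
    intro h
    exact hpre (by rw [← String.toList_eq_nil_iff, hl]; exact h)
  have hn : 0 < l.length := List.length_pos_of_ne_nil hne
  -- A side
  have hcast : (l.length : Int) - 1 = ((l.length - 1 : Nat) : Int) := by omega
  have hprev :
      (match PySem.List.pyGet? l ((l.length : Int) - 1) with
       | some c => [c]
       | none => []) ++ PySem.List.slice l (some 0) (some ((l.length : Int) - 1)) =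
      pvRot l (l.length - 1) := by
    rw [hcast, PySem.List.pyGet?_natCast, List.getElem?_eq_getElem (by omega)]
    rw [PySem.List.slice_zero_start, PySem.List.slice_to_natCast]
    rw [pvRot, drop_pred l hn]
  have hrange : PySem.List.pyRange 0 (l.length : Int) 1 =
      (List.range' 0 l.length).map (fun i : Nat => (i : Int)) := by
    rw [PySem.List.pyRange_zero_natCast, List.range_eq_range']
  have hA := loopA l l.length 0 (l.length - 1) PySem.Dict.empty (by omega) (by omega)
    (by simp [Nat.sub_add_cancel hn])
  -- B side
  rw [hprev, hrange, hA, enumerate_eq l 0, List.map_map,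
      PySem.Dict.ofList, PySem.Dict.update, List.foldl_map, List.range_eq_range']
  congr 1
  apply PySem.List.foldl_congr_mem
  intro d x hx
  have hxl : x < l.length := by
    have := List.mem_range'_1.mp hx
    omega
  simp only [Function.comp_apply, zero_add, PySem.List.slice_from_natCast,
    PySem.List.slice_to_natCast, drop_take_one l x hxl, List.getD_eq_getElem l 'a' hxl, pvRot]

@[simp] theorem getAlphabetMatrix_raises : Claim_raises_getAlphabetMatrix := by
  unfold Claim_raises_getAlphabetMatrix
  constructor
  · intro a _ hr hp
    exact hp hr
  · exact ⟨by decide, by decide, by decide⟩
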